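-- pv_equiv track=rewrite | github.com/rogersineb/python_developer | Ciencia_da_Computacao_USP_2/submissao_6_semana/encontra_impares.py | encontra_impares
-- ===== SOURCE A (Python) =====
-- def encontra_impares(lista):
--     if len(lista) >= 1:
--         numero = [lista.pop(0)]
--         encontra_impares(lista)
--         if numero[0] % 2 != 0:
--             lista.extend(numero)
--     else:
--         return
--     return lista
-- ===== SOURCE B (Python) =====
-- def encontra_impares(lista):
--     if len(lista) < 1:
--         return None
--     result = [x for x in reversed(lista) if x % 2 != 0]
--     lista.clear()
--     lista.extend(result)
--     return lista
-- ===== Notes on version B (the rewrite author's own statement) =====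
-- stated objective: idiomatic
-- what changed: Replaced A's head-recursion with pop/unwind-append by a single flat comprehension over the reversed list, then clear+extend to keep the in-place mutation.
-- outside the precondition, e.g. on encontra_impares([]): A returns None, B returns None
import Mathlib
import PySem

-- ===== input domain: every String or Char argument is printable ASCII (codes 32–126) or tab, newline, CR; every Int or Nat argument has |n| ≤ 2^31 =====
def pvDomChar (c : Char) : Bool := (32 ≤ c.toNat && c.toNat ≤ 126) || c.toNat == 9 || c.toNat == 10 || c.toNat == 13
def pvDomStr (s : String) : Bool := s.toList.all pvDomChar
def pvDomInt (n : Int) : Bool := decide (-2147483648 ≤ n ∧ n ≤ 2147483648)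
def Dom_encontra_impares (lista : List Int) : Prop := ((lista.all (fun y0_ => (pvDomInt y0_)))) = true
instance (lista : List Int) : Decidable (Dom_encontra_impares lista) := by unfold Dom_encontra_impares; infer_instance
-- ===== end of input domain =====

-- B replaces A's head-recursion (pop(0), recurse, conditionally re-append) by one flat
-- filter pass over the reversed list (idiomatic). Both mutate the argument in place in
-- Python; equivalence here is about the returned value.

-- ===== PORT A =====
-- A pops the head, recurses on the tail (mutating it in place), then re-appends the
-- head if odd; the returned list is the mutated argument.
def encontra_impares (lista : List Int) : List Int :=
  match lista with
  | [] => []            -- Python `return` (None) here; excluded by Pre_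
  | x :: xs =>
      let rest := encontra_impares xs
      if PySem.Int.mod x 2 != 0 then rest ++ [x] else rest

-- ===== PORT B =====
def encontra_impares_alt (lista : List Int) : List Int :=
  if lista.length < 1 then []   -- Python `return None` here; excluded by Pre_
  else lista.reverse.filter (fun x => PySem.Int.mod x 2 != 0)

-- ===== PRECONDITION & SPEC =====
-- Pre_ excludes the empty list, where A (and B) return None, not a value of type list.
def Pre_encontra_impares (lista : List Int) : Prop := lista ≠ []
instance (lista : List Int) : Decidable (Pre_encontra_impares lista) := by unfold Pre_encontra_impares; infer_instance
def pvWitness_encontra_impares : List Int := ([1, 2, 3])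

def Spec_encontra_impares (lista : List Int) (out : List Int) : Prop := out = encontra_impares_alt lista
instance (lista : List Int) (out : List Int) : Decidable (Spec_encontra_impares lista out) := by unfold Spec_encontra_impares; infer_instance

-- ===== CLAIM (what is proved, stated in full; the proofs are below) =====
def Claim_equal_encontra_impares : Prop := ∀ (lista : List Int), Dom_encontra_impares lista → Pre_encontra_impares lista → Spec_encontra_impares lista (encontra_impares lista)

-- ===== LEMMAS AND PROOFS =====
theorem encontra_impares_eq_filter_reverse (l : List Int) :
    encontra_impares l = l.reverse.filter (fun x => PySem.Int.mod x 2 != 0) := by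
  induction l with
  | nil => rfl
  | cons x xs ih =>
      simp only [encontra_impares, ih, List.reverse_cons, List.filter_append,
        List.filter_cons, List.filter_nil]
      by_cases h : (PySem.Int.mod x 2 != 0) = true <;> simp [h] <;> split <;> simp_all

-- ===== VERDICT (by name: the statement is the Claim_ definition above) =====
theorem encontra_impares_spec : Claim_equal_encontra_impares := by
  intro lista _ hpre
  unfold Spec_encontra_impares encontra_impares_alt
  rw [encontra_impares_eq_filter_reverse]
  cases lista with
  | nil => exact absurd rfl hpre
  | cons x xs => simp
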